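-- pv_equiv track=rewrite | github.com/lagor-github/catslap | catslap/utils/text.py | is_decimal
-- ===== SOURCE A (Python) =====
-- def is_decimal(text: str) -> bool:
--   """
--   Checks whether a text is a valid decimal.
--
--   Args:
--     text: Text to evaluate.
--
--   Returns:
--     True if it has decimal format (supports sign).
--   """
--   text = trim(text)
--   if is_empty(text):
--     return False
--   idx = 0
--   if text[idx] == '-' or text[idx] == '+':
--     idx += 1
--   dot = False
--   while idx < len(text):
--     char = text[idx]
--     if char == '.' and not dot:
--       dot = True
--       idx += 1
--       continue
--     if char < '0' or char > '9':
--       return False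
--     idx += 1
--   return True
--
-- def trim(string: str|None):
--   """
--   Trims spaces and line breaks from both ends.
--
--   Args:
--     string: Text to clean.
--
--   Returns:
--     Text without leading/trailing whitespace.
--   """
--   if string is None or not isinstance(string, str) or len(string) == 0:
--     return ''
--   if not isinstance(string, str):
--     string = str(string)
--   if string[0] == '\uFEFF':
--     string = string[1:]
--   return string.strip(' \t\r\n')
--
-- def is_empty(value: any) -> bool:
--   """
--   Checks whether a value is empty (None or empty string after trim).
--
--   Args:
--     value: Value to evaluate.
--
--   Returns:
--     True if empty.
--   """
--   return value is None or trim(str(value)) == ''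
-- ===== SOURCE B (Python) =====
-- def is_decimal(text: str) -> bool:
--     t = text.strip(' \t\r\n')
--     if not t:
--         return False
--     if t[0] in '+-':
--         t = t[1:]
--     return t.count('.') <= 1 and all(c == '.' or '0' <= c <= '9' for c in t)
-- ===== Notes on version B (the rewrite author's own statement) =====
-- stated objective: simpler
-- what changed: Replaces the stateful index loop with a dot flag by a declarative check: strip, drop one optional sign, then at most one dot (count) and every character a digit or dot (all).
import Mathlib
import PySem

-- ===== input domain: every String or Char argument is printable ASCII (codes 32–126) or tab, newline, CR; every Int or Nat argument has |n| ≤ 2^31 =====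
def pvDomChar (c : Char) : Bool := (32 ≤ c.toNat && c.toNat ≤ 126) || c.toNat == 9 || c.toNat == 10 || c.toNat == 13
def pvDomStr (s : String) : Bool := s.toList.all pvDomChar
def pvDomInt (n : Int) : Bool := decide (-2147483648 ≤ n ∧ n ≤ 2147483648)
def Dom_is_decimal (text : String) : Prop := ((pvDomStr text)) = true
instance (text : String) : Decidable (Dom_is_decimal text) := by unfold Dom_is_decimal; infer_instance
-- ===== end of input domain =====

-- B replaces A's stateful index loop (dot flag) by strip + drop one optional sign +
-- a declarative check (at most one dot, every character a digit or the dot); objective: simpler.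

-- ===== PORT A =====
-- trim(string): None/empty guard, BOM drop, strip(' \t\r\n')
def pv_trim : Option String → String
  | none => ""
  | some s =>
    if PySem.Str.len s = 0 then ""
    else
      let s := if PySem.Str.pyGet? s 0 == some '\uFEFF' then PySem.Str.slice s (some 1) none else s
      PySem.Str.stripChars s " \t\r\n"

-- is_empty(value) for a str argument: value is not None, str(value) = value
def pv_is_empty (value : String) : Bool := pv_trim (some value) == ""

-- the while loop of A: state = (remaining chars from idx, dot)
def pv_loop : List Char → Bool → Bool
  | [], _ => true
  | c :: cs, dot =>
    if c == '.' && !dot then pv_loop cs true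
    else if decide (c < '0') || decide ('9' < c) then false
    else pv_loop cs dot

def is_decimal (text : String) : Bool :=
  let text := pv_trim (some text)
  if pv_is_empty text then false
  else
    let cs := text.toList
    let cs :=
      if PySem.List.pyGet? cs 0 == some '-' || PySem.List.pyGet? cs 0 == some '+' then
        cs.drop 1
      else cs
    pv_loop cs false

-- ===== PORT B =====
def is_decimal_alt (text : String) : Bool :=
  let t := (PySem.Str.stripChars text " \t\r\n").toList
  match t with
  | [] => false
  | c :: rest =>
    let t := if c == '+' || c == '-' then rest else c :: rest
    decide (t.count '.' ≤ 1) && t.all (fun c => c == '.' || (decide ('0' ≤ c) && decide (c ≤ '9')))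

-- ===== PRECONDITION & SPEC =====
def Spec_is_decimal (text : String) (out : Bool) : Prop := out = is_decimal_alt text
instance (text : String) (out : Bool) : Decidable (Spec_is_decimal text out) := by unfold Spec_is_decimal; infer_instance

-- ===== CLAIM (what is proved, stated in full; the proofs are below) =====
def Claim_equal_is_decimal : Prop := ∀ (text : String), Dom_is_decimal text → Spec_is_decimal text (is_decimal text)

-- ===== LEMMAS AND PROOFS =====

lemma head?_dropWhile_false (p : Char → Bool) (l : List Char) (c : Char)
    (h : (List.dropWhile p l).head? = some c) : p c = false := by
  induction l with
  | nil => simp at h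
  | cons a l ih =>
    rw [List.dropWhile_cons] at h
    by_cases hp : p a
    · simp [hp] at h; exact ih h
    · simp [hp] at h
      simpa [← h] using hp

lemma dropWhile_dropWhile (p : Char → Bool) (l : List Char) :
    List.dropWhile p (List.dropWhile p l) = List.dropWhile p l := by
  induction l with
  | nil => simp
  | cons a l ih =>
    by_cases hp : p a <;> simp [hp, ih]

lemma getLast?_dropWhile (p : Char → Bool) (l : List Char)
    (h : List.dropWhile p l ≠ []) : (List.dropWhile p l).getLast? = l.getLast? := by
  obtain ⟨pre, hpre⟩ := (List.dropWhile_suffix (l := l) (p := p))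
  conv_rhs => rw [← hpre]
  rw [List.getLast?_append_of_ne_nil _ h]

def strip1 (p : Char → Bool) (l : List Char) : List Char :=
  (List.dropWhile p (List.dropWhile p l).reverse).reverse

lemma stripChars_eq_strip1 (l chars : List Char) :
    PySem.Chars.stripChars l chars = strip1 (fun c => chars.contains c) l := rfl

lemma dropWhile_strip1 (p : Char → Bool) (l : List Char) :
    List.dropWhile p (strip1 p l) = strip1 p l := by
  rcases h : strip1 p l with _ | ⟨c, rest⟩
  · simp
  · have hh : (strip1 p l).head? = some c := by rw [h]; rfl
    unfold strip1 at hh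
    rw [List.head?_reverse] at hh
    have hne : List.dropWhile p (List.dropWhile p l).reverse ≠ [] := by
      intro hE; rw [hE] at hh; simp at hh
    rw [getLast?_dropWhile p _ hne, List.getLast?_reverse] at hh
    have hpc : p c = false := head?_dropWhile_false p l c hh
    rw [List.dropWhile_cons, hpc]
    simp

lemma strip1_idem (p : Char → Bool) (l : List Char) :
    strip1 p (strip1 p l) = strip1 p l := by
  conv_lhs => rw [strip1]
  rw [dropWhile_strip1]
  simp [strip1, dropWhile_dropWhile]

lemma stripChars_idem (l chars : List Char) :
    PySem.Chars.stripChars (PySem.Chars.stripChars l chars) chars =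
      PySem.Chars.stripChars l chars := by
  rw [stripChars_eq_strip1, stripChars_eq_strip1, strip1_idem]

lemma mem_stripChars (l chars : List Char) (a : Char)
    (h : a ∈ PySem.Chars.stripChars l chars) : a ∈ l := by
  unfold PySem.Chars.stripChars at h
  rw [List.mem_reverse] at h
  have h1 := (List.dropWhile_sublist (l := (List.dropWhile (fun c => chars.contains c) l).reverse)
      (fun c => chars.contains c)).mem h
  rw [List.mem_reverse] at h1
  exact (List.dropWhile_sublist (l := l) _).mem h1

-- A's while loop, characterised declaratively
lemma pv_loop_eq (cs : List Char) (dot : Bool) :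
    pv_loop cs dot =
      (decide (cs.count '.' + (if dot then 1 else 0) ≤ 1) &&
       cs.all (fun c => c == '.' || (decide ('0' ≤ c) && decide (c ≤ '9')))) := by
  induction cs generalizing dot with
  | nil => cases dot <;> simp [pv_loop]
  | cons c cs ih =>
    by_cases hdot : c == '.' && !dot
    · obtain ⟨hc, hd⟩ : c = '.' ∧ dot = false := by
        rcases Bool.and_eq_true_iff.mp hdot with ⟨h1, h2⟩
        exact ⟨by simpa using h1, by simpa using h2⟩
      subst hc hd
      rw [pv_loop, if_pos hdot, ih]
      simp [List.all_cons]
    · rw [pv_loop, if_neg (by simp_all)]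
      cases hbad : (decide (c < '0') || decide ('9' < c)) with
      | true =>
        rw [if_pos rfl]
        by_cases hc : c = '.'
        · subst hc
          have hd : dot = true := by
            cases dot <;> simp_all
          subst hd
          simp
        · have : (c == '.' || (decide ('0' ≤ c) && decide (c ≤ '9'))) = false := by
            simp only [Bool.or_eq_false_iff, Bool.and_eq_false_iff]
            constructor
            · simpa using hc
            · rcases Bool.or_eq_true_iff.mp hbad with h | h
              · left; simpa [not_le] using of_decide_eq_true h
              · right; simpa [not_le] using of_decide_eq_true h
          simp [List.all_cons, this]
      | false =>
        rw [if_neg (by simp), ih]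
        obtain ⟨ha, hb⟩ := Bool.or_eq_false_iff.mp hbad
        have h0 : '0' ≤ c := not_lt.mp (of_decide_eq_false ha)
        have h9 : c ≤ '9' := not_lt.mp (of_decide_eq_false hb)
        have hc : (c == '.') = false := by
          simp only [beq_eq_false_iff_ne, ne_eq]
          intro h; subst h; revert h0; decide
        simp [List.count_cons, List.all_cons, hc, h0, h9]

lemma pv_trim_of_dom (text : String) (hdom : pvDomStr text = true) :
    pv_trim (some text) = PySem.Str.stripChars text " \t\r\n" := by
  simp only [pv_trim]
  by_cases h0 : PySem.Str.len text = 0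
  · rw [if_pos h0]
    have : text = "" := by
      rw [PySem.Str.len_eq] at h0
      have : text.toList = [] := by
        cases h : text.toList
        · rfl
        · exfalso; rw [h] at h0; simp at h0; omega
      rw [← String.ofList_toList (s := text), this]
    subst this; decide
  · rw [if_neg h0]
    have hne : text.toList ≠ [] := by
      intro h
      rw [PySem.Str.len_eq, h] at h0; simp at h0
    rcases h : text.toList with _ | ⟨c, cs⟩
    · exact absurd h hne
    · have hbom : (PySem.Str.pyGet? text 0 == some '\uFEFF') = false := by
        have : PySem.Str.pyGet? text ((0 : Nat) : Int) = text.toList[(0 : Nat)]? :=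
          PySem.Str.pyGet?_natCast text 0
        rw [show ((0:Nat):Int) = (0:Int) by rfl] at this
        rw [this, h]
        simp only [List.getElem?_cons_zero, beq_eq_false_iff_ne, ne_eq, Option.some.injEq]
        intro hcc
        have hmem : c ∈ text.toList := by rw [h]; exact List.mem_cons_self
        have := List.all_eq_true.mp hdom c hmem
        rw [hcc] at this
        simp [pvDomChar, Char.toNat] at this
      rw [hbom]
      simp

lemma pv_is_empty_strip (text : String) (hdom : pvDomStr text = true) :
    pv_is_empty (PySem.Str.stripChars text " \t\r\n") =
      ((PySem.Str.stripChars text " \t\r\n").toList == []) := by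
  simp only [pv_is_empty, pv_trim]
  set T := PySem.Str.stripChars text " \t\r\n" with hT
  by_cases h0 : PySem.Str.len T = 0
  · rw [if_pos h0]
    rw [PySem.Str.len_eq] at h0
    have : T.toList = [] := by
      cases h : T.toList
      · rfl
      · exfalso; rw [h] at h0; simp at h0; omega
    simp [this]
  · rw [if_neg h0]
    have hTl : T.toList = PySem.Chars.stripChars text.toList (" \t\r\n").toList :=
      PySem.Str.toList_stripChars text " \t\r\n"
    have hne : T.toList ≠ [] := by
      intro h
      rw [PySem.Str.len_eq, h] at h0; simp at h0
    rcases h : T.toList with _ | ⟨c, cs⟩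
    · exact absurd h hne
    · have hmem : c ∈ text.toList := by
        apply mem_stripChars text.toList (" \t\r\n").toList
        rw [← hTl, h]; exact List.mem_cons_self
      have hbom : (PySem.Str.pyGet? T 0 == some '\uFEFF') = false := by
        have h1 : PySem.Str.pyGet? T ((0 : Nat) : Int) = T.toList[(0 : Nat)]? :=
          PySem.Str.pyGet?_natCast T 0
        rw [show ((0:Nat):Int) = (0:Int) by rfl] at h1
        rw [h1, h]
        simp only [List.getElem?_cons_zero, beq_eq_false_iff_ne, ne_eq, Option.some.injEq]
        intro hcc
        have := List.all_eq_true.mp hdom c hmem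
        rw [hcc] at this
        simp [pvDomChar, Char.toNat] at this
      rw [hbom]
      simp only [Bool.false_eq_true, if_false]
      have hidem : PySem.Str.stripChars T " \t\r\n" = T := by
        apply String.toList_injective
        rw [PySem.Str.toList_stripChars, hTl, stripChars_idem]
      rw [hidem]
      have hTne : (T == "") = false := by
        simp only [beq_eq_false_iff_ne, ne_eq]
        intro hE; rw [hE] at hne; exact hne rfl
      rw [hTne]
      simp

-- ===== VERDICT (by name: the statement is the Claim_ definition above) =====
theorem is_decimal_spec : Claim_equal_is_decimal := by
  intro text hdom
  have hdom' : pvDomStr text = true := hdom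
  unfold Spec_is_decimal
  simp only [is_decimal, is_decimal_alt, pv_trim_of_dom text hdom',
    pv_is_empty_strip text hdom']
  rcases h : (PySem.Str.stripChars text " \t\r\n").toList with _ | ⟨c, cs⟩
  · simp
  · have hbe : ((c :: cs : List Char) == ([] : List Char)) = false := by simp
    rw [hbe]
    simp only [Bool.false_eq_true, if_false]
    have hget : PySem.List.pyGet? (c :: cs) (0 : Int) = some c := by
      simp [PySem.List.pyGet?, PySem.List.pyIdx?]
    have hcond : (some c == some '-' || some c == some '+') = (c == '+' || c == '-') := by
      by_cases h1 : c = '-' <;> by_cases h2 : c = '+' <;> simp [h1, h2, Bool.or_comm]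
    rw [hget, hcond]
    by_cases hsgn : (c == '+' || c == '-') = true
    · rw [if_pos hsgn, if_pos hsgn, List.drop_one, List.tail_cons, pv_loop_eq]
      simp [Bool.and_comm]
    · rw [if_neg hsgn, if_neg hsgn, pv_loop_eq]
      simp [Bool.and_comm]
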